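-- pv_equiv track=rewrite | github.com/10XGenomics/longranger | mro/stages/structvars/prepare_svcalling_ranges/__init__.py | get_good_ranges_old
-- ===== SOURCE A (Python) =====
-- def get_good_ranges_old(bad_poses, chrom_len, min_gap = 100):
--     """Gets a list of "bad" positions on the chromosome and returns a list of "good" ranges.
--     Args:
--     - bad_poses: array of bad positions.
--     - chrom_len: Length of chromosome.
--     - min_gap: minimum length of a "bad region". Smaller bad regions will be ignored.
--     This is also the minimum length of a good region. A good region with length < min_gap
--     surrounded by bad regions will be merged with the surrounding bad regions.
--     - win_around_bad: extra buffer to add around the bad regions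
--
--     Return value:
--     A list of tuples (start, stop) with the good regions on the chromosome. These are BED-like
--     (start pos inclusive, stop pos exclusive).
--     """
--
--     # Get the ranges of bad regions
--     bad_regions = []
--     if len(bad_poses) > 0:
--         start = bad_poses[0]
--         stop = start
--         for i, p in enumerate(bad_poses):
--             if p > chrom_len:
--                 break
--             if p - stop <= min_gap:
--                 # Keep merging into the previous bad region
--                 stop = p
--             else:
--                 if stop - start + 1 >= min_gap:
--                     # bad region long enough to not ignore
--                     bad_regions.append((start, stop + 1))
--                 start = p
--                 stop = p
--         if stop - start + 1 >= min_gap: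
--             bad_regions.append((start, stop + 1))
--
--     good_regions = []
--     if len(bad_regions) > 0:
--         if bad_regions[0][0] > 0:
--             # Chromosome doesn't start with a bad region
--             good_regions.append((0, bad_regions[0][0]))
--         if len(bad_regions) > 1:
--             for i, b in enumerate(bad_regions[1:]):
--                 # bad_regions[i] will be the region before b
--                 # Add to the good regions the region between the end of the previous
--                 # bad region and the beginning of b.
--                 # No need to test if the middle region is long enough
--                 good_regions.append((bad_regions[i][1], b[0]))
--
--         if chrom_len - bad_regions[-1][1] + 1 >= min_gap:
--             good_regions.append((bad_regions[-1][1], chrom_len))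
--     elif chrom_len >= min_gap:
--         good_regions = [(0, chrom_len)]
--     return good_regions
-- ===== SOURCE B (Python) =====
-- def get_good_ranges_old(bad_poses, chrom_len, min_gap = 100):
--     """Single-pass: scan bad_poses once, emitting good ranges directly as each
--     merged bad region closes, without building an intermediate bad-region list."""
--     if not bad_poses:
--         return [(0, chrom_len)] if chrom_len >= min_gap else []
--
--     def close(start, stop, prev_end, out):
--         # Close the current bad region; emit the good gap before it if it is kept.
--         if stop - start + 1 >= min_gap:
--             if prev_end is None:
--                 if start > 0:
--                     out.append((0, start))
--             else:
--                 out.append((prev_end, start))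
--             return stop + 1
--         return prev_end
--
--     out = []
--     prev_end = None          # end (exclusive) of the last kept bad region
--     start = stop = bad_poses[0]
--     for p in bad_poses:
--         if p > chrom_len:
--             break
--         if p - stop <= min_gap:
--             stop = p
--         else:
--             prev_end = close(start, stop, prev_end, out)
--             start = stop = p
--     prev_end = close(start, stop, prev_end, out)
--
--     if prev_end is None:
--         return [(0, chrom_len)] if chrom_len >= min_gap else []
--     if chrom_len - prev_end + 1 >= min_gap:
--         out.append((prev_end, chrom_len))
--     return out
-- ===== Notes on version B (the rewrite author's own statement) =====
-- stated objective: alternative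
-- what changed: Fused A's two passes (build bad_regions list, then derive good regions from it) into one linear scan over bad_poses that emits each good region directly when a bad region closes, tracking only the previous kept region's end; no intermediate bad-region list.
import Mathlib
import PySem

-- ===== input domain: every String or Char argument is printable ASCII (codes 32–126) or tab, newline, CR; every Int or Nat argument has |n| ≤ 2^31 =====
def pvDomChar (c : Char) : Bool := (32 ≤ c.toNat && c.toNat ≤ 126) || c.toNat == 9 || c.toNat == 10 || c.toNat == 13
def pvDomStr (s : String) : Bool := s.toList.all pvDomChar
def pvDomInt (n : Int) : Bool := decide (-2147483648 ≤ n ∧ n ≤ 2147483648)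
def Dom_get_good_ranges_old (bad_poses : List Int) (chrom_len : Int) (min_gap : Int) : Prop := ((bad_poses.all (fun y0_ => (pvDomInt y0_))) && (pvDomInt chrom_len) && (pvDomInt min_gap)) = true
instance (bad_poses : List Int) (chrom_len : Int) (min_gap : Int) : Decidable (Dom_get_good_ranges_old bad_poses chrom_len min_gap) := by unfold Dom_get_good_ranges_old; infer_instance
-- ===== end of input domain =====

-- B fuses A's two passes into one scan emitting good regions directly (objective: alternative, same cost).

-- ===== PORT A =====
-- A's first loop over bad_poses (with the `p > chrom_len` break); returns (acc, start, stop).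
def badLoopA (l : List Int) (chrom_len min_gap start stop : Int)
    (acc : List (Int × Int)) : List (Int × Int) × Int × Int :=
  match l with
  | [] => (acc, start, stop)
  | p :: rest =>
    if p > chrom_len then (acc, start, stop)
    else if p - stop ≤ min_gap then badLoopA rest chrom_len min_gap start p acc
    else if stop - start + 1 ≥ min_gap then
      badLoopA rest chrom_len min_gap p p (acc ++ [(start, stop + 1)])
    else badLoopA rest chrom_len min_gap p p acc

-- A's second half: good regions from bad_regions (the enumerate over bad_regions[1:]
-- pairing bad_regions[i] with b is the zip of the list with its tail).
def goodOfA (regions : List (Int × Int)) (chrom_len min_gap : Int) : List (Int × Int) :=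
  match regions with
  | [] => if chrom_len ≥ min_gap then [(0, chrom_len)] else []
  | r0 :: rest =>
    ((if r0.1 > 0 then [(0, r0.1)] else []) ++
      ((r0 :: rest).zip rest).map (fun ab => (ab.1.2, ab.2.1))) ++
    (if chrom_len - ((r0 :: rest).getLast (by simp)).2 + 1 ≥ min_gap then
      [(((r0 :: rest).getLast (by simp)).2, chrom_len)] else [])

def get_good_ranges_old (bad_poses : List Int) (chrom_len : Int) (min_gap : Int) : List (Int × Int) :=
  let bad_regions :=
    match bad_poses with
    | [] => []
    | p0 :: _ =>
      let r := badLoopA bad_poses chrom_len min_gap p0 p0 []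
      if r.2.2 - r.2.1 + 1 ≥ min_gap then r.1 ++ [(r.2.1, r.2.2 + 1)] else r.1
  goodOfA bad_regions chrom_len min_gap

-- ===== PORT B =====
-- Source B's `close`: close the bad region [start,stop]; emit the good gap before it if kept.
def closeB (start stop min_gap : Int) (prev_end : Option Int)
    (out : List (Int × Int)) : Option Int × List (Int × Int) :=
  if stop - start + 1 ≥ min_gap then
    (some (stop + 1),
      match prev_end with
      | none => if start > 0 then out ++ [(0, start)] else out
      | some e => out ++ [(e, start)])
  else (prev_end, out)

-- Source B's code after the loop (also reached via the break).
def finishB (chrom_len min_gap start stop : Int) (prev_end : Option Int)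
    (out : List (Int × Int)) : List (Int × Int) :=
  let r := closeB start stop min_gap prev_end out
  match r.1 with
  | none => if chrom_len ≥ min_gap then [(0, chrom_len)] else []
  | some e => if chrom_len - e + 1 ≥ min_gap then r.2 ++ [(e, chrom_len)] else r.2

-- Source B's single scan.
def loopB (l : List Int) (chrom_len min_gap start stop : Int) (prev_end : Option Int)
    (out : List (Int × Int)) : List (Int × Int) :=
  match l with
  | [] => finishB chrom_len min_gap start stop prev_end out
  | p :: rest =>
    if p > chrom_len then finishB chrom_len min_gap start stop prev_end out
    else if p - stop ≤ min_gap then loopB rest chrom_len min_gap start p prev_end out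
    else
      let r := closeB start stop min_gap prev_end out
      loopB rest chrom_len min_gap p p r.1 r.2

def get_good_ranges_old_alt (bad_poses : List Int) (chrom_len : Int) (min_gap : Int) : List (Int × Int) :=
  match bad_poses with
  | [] => if chrom_len ≥ min_gap then [(0, chrom_len)] else []
  | p0 :: _ => loopB bad_poses chrom_len min_gap p0 p0 none []

-- ===== PRECONDITION & SPEC =====
def Spec_get_good_ranges_old (bad_poses : List Int) (chrom_len : Int) (min_gap : Int) (out : List (Int × Int)) : Prop := out = get_good_ranges_old_alt bad_poses chrom_len min_gap
instance (bad_poses : List Int) (chrom_len : Int) (min_gap : Int) (out : List (Int × Int)) : Decidable (Spec_get_good_ranges_old bad_poses chrom_len min_gap out) := by unfold Spec_get_good_ranges_old; infer_instance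

-- ===== CLAIM (what is proved, stated in full; the proofs are below) =====
def Claim_equal_get_good_ranges_old : Prop := ∀ (bad_poses : List Int) (chrom_len : Int) (min_gap : Int), Dom_get_good_ranges_old bad_poses chrom_len min_gap → Spec_get_good_ranges_old bad_poses chrom_len min_gap (get_good_ranges_old bad_poses chrom_len min_gap)

-- ===== LEMMAS AND PROOFS =====

-- The good regions A derives from a PREFIX of bad_regions (leading gap + inner gaps).
def gpref (regions : List (Int × Int)) : List (Int × Int) :=
  match regions with
  | [] => []
  | r0 :: rest =>
    (if r0.1 > 0 then [(0, r0.1)] else []) ++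
      ((r0 :: rest).zip rest).map (fun ab => (ab.1.2, ab.2.1))

-- End of the last bad region of a prefix, if any.
def lastEnd (regions : List (Int × Int)) : Option Int :=
  regions.getLast?.map Prod.snd

theorem lastEnd_append (acc : List (Int × Int)) (r : Int × Int) :
    lastEnd (acc ++ [r]) = some r.2 := by
  simp [lastEnd]

theorem zipmap_append (f : (Int × Int) × (Int × Int) → Int × Int)
    (a : Int × Int) (l : List (Int × Int)) (x : Int × Int) :
    ((a :: l ++ [x]).zip (l ++ [x])).map f
      = ((a :: l).zip l).map f ++ [f ((a :: l).getLast (by simp), x)] := by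
  induction l generalizing a with
  | nil => simp
  | cons b t ih =>
    have := ih b
    simp only [List.cons_append, List.zip_cons_cons, List.map_cons] at *
    rw [this]
    simp [List.getLast]

theorem gpref_append (acc : List (Int × Int)) (s t : Int) :
    gpref (acc ++ [(s, t)])
      = gpref acc ++
        (match lastEnd acc with
          | none => if s > 0 then [(0, s)] else []
          | some e => [(e, s)]) := by
  cases acc with
  | nil => simp [gpref, lastEnd]
  | cons r0 rest =>
    have h := zipmap_append (fun ab => (ab.1.2, ab.2.1)) r0 rest (s, t)
    simp only [gpref, lastEnd, List.cons_append] at *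
    rw [h]
    simp [List.getLast?_eq_some_getLast (l := r0 :: rest) (by simp), List.append_assoc]

theorem goodOfA_eq (regions : List (Int × Int)) (cl mg : Int) :
    goodOfA regions cl mg
      = match lastEnd regions with
        | none => if cl ≥ mg then [(0, cl)] else []
        | some e => gpref regions ++ (if cl - e + 1 ≥ mg then [(e, cl)] else []) := by
  cases regions with
  | nil => simp [goodOfA, lastEnd]
  | cons r0 rest =>
    simp [goodOfA, lastEnd, gpref,
      List.getLast?_eq_some_getLast (l := r0 :: rest) (by simp)]

theorem closeB_eq (s t mg : Int) (acc : List (Int × Int)) :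
    closeB s t mg (lastEnd acc) (gpref acc)
      = (lastEnd (if t - s + 1 ≥ mg then acc ++ [(s, t + 1)] else acc),
         gpref (if t - s + 1 ≥ mg then acc ++ [(s, t + 1)] else acc)) := by
  by_cases h : t - s + 1 ≥ mg
  · simp only [closeB, if_pos h, lastEnd_append, gpref_append]
    cases hl : lastEnd acc <;> simp <;> split_ifs <;> simp
  · simp [closeB, h]

theorem finishB_eq (cl mg s t : Int) (acc : List (Int × Int)) :
    finishB cl mg s t (lastEnd acc) (gpref acc)
      = goodOfA (if t - s + 1 ≥ mg then acc ++ [(s, t + 1)] else acc) cl mg := by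
  rw [goodOfA_eq]
  simp only [finishB, closeB_eq]
  cases hl : lastEnd (if t - s + 1 ≥ mg then acc ++ [(s, t + 1)] else acc) <;> simp <;> split_ifs <;> simp

theorem loopB_eq (l : List Int) (cl mg s t : Int) (acc : List (Int × Int)) :
    loopB l cl mg s t (lastEnd acc) (gpref acc)
      = (let r := badLoopA l cl mg s t acc
         goodOfA (if r.2.2 - r.2.1 + 1 ≥ mg then r.1 ++ [(r.2.1, r.2.2 + 1)] else r.1) cl mg) := by
  induction l generalizing s t acc with
  | nil => simpa [loopB, badLoopA] using finishB_eq cl mg s t acc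
  | cons p rest ih =>
    by_cases h1 : p > cl
    · simpa [loopB, badLoopA, h1] using finishB_eq cl mg s t acc
    · by_cases h2 : p - t ≤ mg
      · simpa [loopB, badLoopA, h1, h2] using ih s p acc
      · simp only [loopB, badLoopA, if_neg h1, if_neg h2, closeB_eq]
        by_cases h3 : t - s + 1 ≥ mg
        · simpa [h3] using ih p p (acc ++ [(s, t + 1)])
        · simpa [h3, if_neg (by omega : ¬ t - s + 1 ≥ mg)] using ih p p acc

-- ===== VERDICT (by name: the statement is the Claim_ definition above) =====
theorem get_good_ranges_old_spec : Claim_equal_get_good_ranges_old := by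
  intro bp cl mg _
  unfold Spec_get_good_ranges_old get_good_ranges_old get_good_ranges_old_alt
  cases bp with
  | nil => simp [goodOfA]
  | cons p0 rest =>
    have h := loopB_eq (p0 :: rest) cl mg p0 p0 []
    simpa [lastEnd, gpref] using h.symm
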